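-- pv_equiv track=rewrite | github.com/renjieliu/leetcode | 1500_1999/1989.py | catchMaximumAmountofPeople
-- ===== SOURCE A (Python) =====
-- def catchMaximumAmountofPeople(team: 'List[int]', dist: int) -> int:
--     p0 = p1 = 0 # pointer for 1 and 0
--     cnt = 0
--     while p1 < len(team): # move the pointer for 0
--         if team[p1] == 1:
--             while p0 < len(team) and p0 <= p1+dist: # move the pointer for 0
--                 if team[p0] == 0 and p1-dist <= p0 <= p1+dist:
--                     cnt += 1
--                     p0 += 1 #advance the 0 pointer after count
--                     break
--                 p0+=1
--         p1+=1
--     return cnt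
-- ===== SOURCE B (Python) =====
-- def catchMaximumAmountofPeople(team: 'List[int]', dist: int) -> int:
--     people = []
--     catchers = []
--     for idx, v in enumerate(team):
--         if v == 0:
--             people.append(idx)
--         elif v == 1:
--             catchers.append(idx)
--     cnt = 0
--     i = j = 0
--     while i < len(people) and j < len(catchers):
--         if abs(people[i] - catchers[j]) <= dist:
--             cnt += 1
--             i += 1
--             j += 1
--         elif people[i] < catchers[j]:
--             i += 1
--         else:
--             j += 1
--     return cnt
-- ===== Notes on version B (the rewrite author's own statement) =====
-- stated objective: alternative
-- what changed: B first builds the ascending index lists of people (0s) and catchers (1s) in one pass and then runs a two-pointer merge over those two lists, instead of A's nested scan over the raw array with a persistent 0-pointer.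
import Mathlib
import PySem

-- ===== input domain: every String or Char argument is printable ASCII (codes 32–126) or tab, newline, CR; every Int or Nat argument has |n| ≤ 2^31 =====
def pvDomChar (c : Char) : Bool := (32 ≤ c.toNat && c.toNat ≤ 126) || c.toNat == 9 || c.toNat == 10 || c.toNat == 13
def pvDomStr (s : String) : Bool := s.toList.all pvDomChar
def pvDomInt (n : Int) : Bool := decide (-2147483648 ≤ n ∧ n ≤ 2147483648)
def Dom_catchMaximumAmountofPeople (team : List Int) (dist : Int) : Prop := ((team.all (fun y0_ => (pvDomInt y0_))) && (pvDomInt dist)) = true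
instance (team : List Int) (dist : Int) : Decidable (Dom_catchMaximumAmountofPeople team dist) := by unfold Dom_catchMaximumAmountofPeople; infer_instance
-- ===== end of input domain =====

-- B replaces A's nested scan over the raw array by one index-collecting pass plus a two-pointer merge (alternative decomposition).

-- ===== PORT A =====
-- A's inner `while` loop: scans p0 forward; returns the new p0 and whether a person was caught.
-- Python's p0/p1 pointers are nonnegative throughout, so they are carried as Nat.
def pvAInner (team : List Int) (dist : Int) (p1 : Nat) (p0 : Nat) : Nat × Bool :=
  if h : p0 < team.length ∧ (p0 : Int) ≤ (p1 : Int) + dist then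
    if team[p0]'h.1 = 0 ∧ (p1 : Int) - dist ≤ (p0 : Int) ∧ (p0 : Int) ≤ (p1 : Int) + dist then
      (p0 + 1, true)
    else
      pvAInner team dist p1 (p0 + 1)
  else
    (p0, false)
termination_by team.length - p0
decreasing_by omega

-- A's outer `while` loop over p1, threading (p0, cnt).
def pvAOuter (team : List Int) (dist : Int) (p1 : Nat) (p0 : Nat) (cnt : Int) : Int :=
  if h : p1 < team.length then
    if team[p1]'h = 1 then
      pvAOuter team dist (p1 + 1) (pvAInner team dist p1 p0).1
        (cnt + if (pvAInner team dist p1 p0).2 then 1 else 0)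
    else
      pvAOuter team dist (p1 + 1) p0 cnt
  else
    cnt
termination_by team.length - p1
decreasing_by all_goals omega

def catchMaximumAmountofPeople (team : List Int) (dist : Int) : Int :=
  pvAOuter team dist 0 0 0

-- ===== PORT B =====
-- B's index-collecting pass: (people indices, catcher indices), both ascending from `base`.
def pvBuild : List Int → Int → List Int × List Int
  | [], _ => ([], [])
  | v :: rest, base =>
      let r := pvBuild rest (base + 1)
      if v = 0 then (base :: r.1, r.2)
      else if v = 1 then (r.1, base :: r.2)
      else r

-- B's two-pointer merge over the people and catcher lists.
def pvTwoPtr (dist : Int) : List Int → List Int → Int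
  | [], _ => 0
  | _ :: _, [] => 0
  | p :: ps, c :: cs =>
      if |p - c| ≤ dist then 1 + pvTwoPtr dist ps cs
      else if p < c then pvTwoPtr dist ps (c :: cs)
      else pvTwoPtr dist (p :: ps) cs
termination_by ps cs => ps.length + cs.length
decreasing_by all_goals (simp [List.length]; try omega)

def catchMaximumAmountofPeople_alt (team : List Int) (dist : Int) : Int :=
  let r := pvBuild team 0
  pvTwoPtr dist r.1 r.2

-- ===== PRECONDITION & SPEC =====
def Spec_catchMaximumAmountofPeople (team : List Int) (dist : Int) (out : Int) : Prop := out = catchMaximumAmountofPeople_alt team dist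
instance (team : List Int) (dist : Int) (out : Int) : Decidable (Spec_catchMaximumAmountofPeople team dist out) := by unfold Spec_catchMaximumAmountofPeople; infer_instance

-- ===== CLAIM (what is proved, stated in full; the proofs are below) =====
def Claim_equal_catchMaximumAmountofPeople : Prop := ∀ (team : List Int) (dist : Int), Dom_catchMaximumAmountofPeople team dist → Spec_catchMaximumAmountofPeople team dist (catchMaximumAmountofPeople team dist)

-- ===== LEMMAS AND PROOFS =====

-- People (resp. catcher) indices of the suffix of `team` from position k, with true indices.
def pvZFrom (team : List Int) (k : Nat) : List Int := (pvBuild (team.drop k) (k : Int)).1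
def pvCFrom (team : List Int) (k : Nat) : List Int := (pvBuild (team.drop k) (k : Int)).2

theorem pvBuild_mem_ge : ∀ (l : List Int) (base : Int),
    (∀ x ∈ (pvBuild l base).1, base ≤ x) ∧ (∀ x ∈ (pvBuild l base).2, base ≤ x) := by
  intro l
  induction l with
  | nil => intro base; simp [pvBuild]
  | cons v rest ih =>
      intro base
      have h := ih (base + 1)
      obtain ⟨ih1, ih2⟩ := h
      simp only [pvBuild]
      split_ifs with h0 h1
      · refine ⟨?_, ?_⟩ <;> intro x hx
        · rcases List.mem_cons.1 hx with rfl | hx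
          · omega
          · have := ih1 x hx; omega
        · have := ih2 x hx; omega
      · refine ⟨?_, ?_⟩ <;> intro x hx
        · have := ih1 x hx; omega
        · rcases List.mem_cons.1 hx with rfl | hx
          · omega
          · have := ih2 x hx; omega
      · exact ⟨fun x hx => by have := ih1 x hx; omega,
               fun x hx => by have := ih2 x hx; omega⟩

theorem pvZFrom_ge (team : List Int) (k : Nat) : ∀ x ∈ pvZFrom team k, (k : Int) ≤ x :=
  (pvBuild_mem_ge (team.drop k) k).1

theorem pvFrom_stop (team : List Int) (k : Nat) (h : team.length ≤ k) :
    pvZFrom team k = [] ∧ pvCFrom team k = [] := by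
  unfold pvZFrom pvCFrom
  rw [List.drop_eq_nil_of_le h]
  simp [pvBuild]

theorem pvFrom_step (team : List Int) (k : Nat) (h : k < team.length) :
    (pvZFrom team k = if team[k] = 0 then (k : Int) :: pvZFrom team (k + 1) else pvZFrom team (k + 1)) ∧
    (pvCFrom team k = if team[k] = 1 then (k : Int) :: pvCFrom team (k + 1) else pvCFrom team (k + 1)) := by
  have hc : ((k + 1 : Nat) : Int) = (k : Int) + 1 := by push_cast; ring
  unfold pvZFrom pvCFrom
  rw [List.drop_eq_getElem_cons h, hc]
  simp only [pvBuild]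
  by_cases h0 : team[k] = 0
  · simp [h0]
  · by_cases h1 : team[k] = 1
    · simp [h0, h1]
    · simp [h0, h1]

-- dist < 0: both programs never match anyone.
theorem pvTwoPtr_neg (dist : Int) (hd : dist < 0) :
    ∀ ps cs, pvTwoPtr dist ps cs = 0 := by
  intro ps cs
  induction ps, cs using pvTwoPtr.induct dist with
  | case1 cs => rw [pvTwoPtr]
  | case2 p ps => rw [pvTwoPtr]
  | case3 p ps c cs h ih =>
      exfalso; have := abs_nonneg (p - c); omega
  | case4 p ps c cs h1 h2 ih => rw [pvTwoPtr, if_neg h1, if_pos h2]; exact ih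
  | case5 p ps c cs h1 h2 ih => rw [pvTwoPtr, if_neg h1, if_neg h2]; exact ih

theorem pvAInner_neg (team : List Int) (dist : Int) (hd : dist < 0) (p1 : Nat) :
    ∀ p0, (pvAInner team dist p1 p0).2 = false := by
  intro p0
  induction p0 using pvAInner.induct team dist p1 with
  | case1 p0 h hc =>
      exfalso
      obtain ⟨_, h2, h3⟩ := hc
      omega
  | case2 p0 h hc ih => rw [pvAInner, dif_pos h, if_neg hc]; exact ih
  | case3 p0 h => rw [pvAInner, dif_neg h]

theorem pvAOuter_neg (team : List Int) (dist : Int) (hd : dist < 0) :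
    ∀ (p1 p0 : Nat) (cnt : Int), pvAOuter team dist p1 p0 cnt = cnt := by
  intro p1 p0 cnt
  induction p1, p0, cnt using pvAOuter.induct team dist with
  | case1 p1 p0 cnt h h1 ih =>
      rw [pvAOuter, dif_pos h, if_pos h1]
      simp only [dite_eq_ite] at ih
      rw [pvAInner_neg team dist hd p1 p0] at ih ⊢
      simpa using ih
  | case2 p1 p0 cnt h h1 ih =>
      rw [pvAOuter, dif_pos h, if_neg h1]; exact ih
  | case3 p1 p0 cnt h =>
      rw [pvAOuter, dif_neg h]

theorem pvTwoPtr_nil (dist : Int) (cs : List Int) : pvTwoPtr dist [] cs = 0 := by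
  rw [pvTwoPtr]

-- If every person index is strictly beyond p1 + dist, the catcher p1 is skipped by the merge.
theorem pvTwoPtr_drop_catcher (dist : Int) (hd : 0 ≤ dist) (z : List Int) (c : Int) (C : List Int)
    (hz : ∀ x ∈ z, c + dist < x) :
    pvTwoPtr dist z (c :: C) = pvTwoPtr dist z C := by
  cases z with
  | nil =>
      cases C <;> simp [pvTwoPtr]
  | cons p ps =>
      have hp : c + dist < p := hz p (by simp)
      have h1 : ¬ |p - c| ≤ dist := by
        rw [abs_le]; omega
      have h2 : ¬ p < c := by omega
      rw [pvTwoPtr]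
      simp [h1, h2]

-- Inner invariant: one catcher step of A matches one catcher step of the merge.
theorem pv_inner_eq (team : List Int) (dist : Int) (hd : 0 ≤ dist) (p1 : Nat) (C : List Int) :
    ∀ p0, pvTwoPtr dist (pvZFrom team p0) ((p1 : Int) :: C)
      = (if (pvAInner team dist p1 p0).2 then 1 else 0)
        + pvTwoPtr dist (pvZFrom team (pvAInner team dist p1 p0).1) C := by
  intro p0
  induction p0 using pvAInner.induct team dist p1 with
  | case1 p0 h hc =>
      -- guard holds, match: team[p0] = 0 and p1-dist ≤ p0 ≤ p1+dist
      rw [pvAInner, dif_pos h, if_pos hc]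
      obtain ⟨h0, hlo, hhi⟩ := hc
      rw [(pvFrom_step team p0 h.1).1, if_pos h0]
      have habs : |(p0 : Int) - (p1 : Int)| ≤ dist := by rw [abs_le]; omega
      rw [pvTwoPtr, if_pos habs]
      simp
  | case2 p0 h hc ih =>
      -- guard holds, no match at p0: either team[p0] ≠ 0, or p0 < p1 - dist
      rw [pvAInner, dif_pos h, if_neg hc]
      by_cases h0 : team[p0]'h.1 = 0
      · -- skipped person: p0 < p1 - dist, merge drops it too
        have hlo : ¬ ((p1 : Int) - dist ≤ (p0 : Int)) := by
          intro hx; exact hc ⟨h0, hx, h.2⟩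
        rw [(pvFrom_step team p0 h.1).1, if_pos h0]
        have habs : ¬ |(p0 : Int) - (p1 : Int)| ≤ dist := by rw [abs_le]; omega
        have hlt : (p0 : Int) < (p1 : Int) := by omega
        rw [pvTwoPtr, if_neg habs, if_pos hlt]
        exact ih
      · rw [(pvFrom_step team p0 h.1).1, if_neg h0]
        exact ih
  | case3 p0 h =>
      -- guard fails: p0 ≥ len, or p0 > p1 + dist
      rw [pvAInner, dif_neg h]
      by_cases hlen : p0 < team.length
      · have hgt : (p1 : Int) + dist < (p0 : Int) := by
          by_contra hx; exact h ⟨hlen, by omega⟩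
        have := pvTwoPtr_drop_catcher dist hd (pvZFrom team p0) (p1 : Int) C
          (fun x hx => lt_of_lt_of_le hgt (pvZFrom_ge team p0 x hx))
        simpa using this
      · simp [(pvFrom_stop team p0 (by omega)).1, pvTwoPtr_nil]

-- Outer invariant.
theorem pv_outer_eq (team : List Int) (dist : Int) (hd : 0 ≤ dist) :
    ∀ (p1 p0 : Nat) (cnt : Int), pvAOuter team dist p1 p0 cnt
      = cnt + pvTwoPtr dist (pvZFrom team p0) (pvCFrom team p1) := by
  intro p1 p0 cnt
  induction p1, p0, cnt using pvAOuter.induct team dist with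
  | case1 p1 p0 cnt h h1 ih =>
      rw [pvAOuter, dif_pos h, if_pos h1]
      simp only [dite_eq_ite] at ih
      rw [ih]
      rw [(pvFrom_step team p1 h).2, if_pos h1]
      rw [pv_inner_eq team dist hd p1 (pvCFrom team (p1 + 1)) p0]
      ring
  | case2 p1 p0 cnt h h1 ih =>
      rw [pvAOuter, dif_pos h, if_neg h1]
      rw [ih, (pvFrom_step team p1 h).2, if_neg h1]
  | case3 p1 p0 cnt h =>
      rw [pvAOuter, dif_neg h]
      rw [(pvFrom_stop team p1 (by omega)).2]
      cases hz : pvZFrom team p0 <;> rw [pvTwoPtr] <;> simp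

-- ===== VERDICT (by name: the statement is the Claim_ definition above) =====
theorem catchMaximumAmountofPeople_spec : Claim_equal_catchMaximumAmountofPeople := by
  intro team dist _
  unfold Spec_catchMaximumAmountofPeople catchMaximumAmountofPeople catchMaximumAmountofPeople_alt
  by_cases hd : 0 ≤ dist
  · have := pv_outer_eq team dist hd 0 0 0
    unfold pvZFrom pvCFrom at this
    simpa using this
  · rw [pvAOuter_neg team dist (by omega)]
    rw [pvTwoPtr_neg dist (by omega)]
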